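-- pv_equiv track=rewrite | github.com/Techcyte/pipeline-lib | test/example_funcs.py | group_numbers
-- ===== SOURCE A (Python) =====
-- from typing import Iterable, List
--
-- def group_numbers(int_iterator: Iterable[int], num_groups: int)->Iterable[List[int]]:
--     assert num_groups > 0
--     cur_nums = []
--     for num in int_iterator:
--         cur_nums.append(num)
--         if len(cur_nums) == num_groups:
--             yield cur_nums
--             cur_nums = []
--     if cur_nums:
--         yield cur_nums
-- ===== SOURCE B (Python) =====
-- from itertools import islice
-- from typing import Iterable, List
--
-- def group_numbers(int_iterator: Iterable[int], num_groups: int) -> Iterable[List[int]]: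
--     assert num_groups > 0
--     it = iter(int_iterator)
--     while True:
--         chunk = list(islice(it, num_groups))
--         if not chunk:
--             return
--         yield chunk
-- ===== Notes on version B (the rewrite author's own statement) =====
-- stated objective: idiomatic
-- what changed: B pulls whole batches off the iterator with itertools.islice in a while-loop instead of appending element-by-element into a buffer and testing its length against num_groups.
import Mathlib
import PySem

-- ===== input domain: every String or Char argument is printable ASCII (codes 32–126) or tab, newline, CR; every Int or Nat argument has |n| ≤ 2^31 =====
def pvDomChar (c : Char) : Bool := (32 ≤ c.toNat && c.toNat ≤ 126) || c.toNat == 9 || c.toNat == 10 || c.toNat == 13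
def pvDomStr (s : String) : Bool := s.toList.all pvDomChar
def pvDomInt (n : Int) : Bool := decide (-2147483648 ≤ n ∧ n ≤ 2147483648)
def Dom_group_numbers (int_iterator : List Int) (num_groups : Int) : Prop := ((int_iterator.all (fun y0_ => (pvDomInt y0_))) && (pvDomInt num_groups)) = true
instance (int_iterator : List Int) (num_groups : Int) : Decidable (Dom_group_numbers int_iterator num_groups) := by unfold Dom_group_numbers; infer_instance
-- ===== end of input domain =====

-- B groups the list by repeatedly slicing off whole chunks of size num_groups
-- (itertools.islice batching) instead of A's element-by-element buffer-and-count; idiomatic, same cost.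
-- ===== PORT A =====
-- one step of A's for-loop: append num to cur_nums, emit when the buffer reaches num_groups
def pvAStep (num_groups : Int) (p : List (List Int) × List Int) (num : Int) :
    List (List Int) × List Int :=
  let cur := p.2 ++ [num]
  if (cur.length : Int) = num_groups then (p.1 ++ [cur], []) else (p.1, cur)

def group_numbers (int_iterator : List Int) (num_groups : Int) : List (List Int) :=
  let r := int_iterator.foldl (pvAStep num_groups) ([], [])
  if r.2 = [] then r.1 else r.1 ++ [r.2]

-- ===== PORT B =====
-- chunk = list(islice(it, k)); stop on empty chunk, else yield and recurse on the rest.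
-- (k = 0 case returns [] only for totality; the assert in B puts num_groups ≤ 0 outside Pre_.)
def pvChunks (xs : List Int) (k : Nat) : List (List Int) :=
  if hxs : xs = [] then []
  else if hk : k = 0 then []
  else xs.take k :: pvChunks (xs.drop k) k
termination_by xs.length
decreasing_by
  have h1 : 0 < xs.length := List.length_pos_of_ne_nil hxs
  have h2 : 0 < k := Nat.pos_of_ne_zero hk
  simp [List.length_drop]
  omega

def group_numbers_alt (int_iterator : List Int) (num_groups : Int) : List (List Int) :=
  pvChunks int_iterator num_groups.toNat

-- ===== PRECONDITION & SPEC =====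
-- A's 'assert num_groups > 0' raises AssertionError for num_groups <= 0.
def Pre_group_numbers (int_iterator : List Int) (num_groups : Int) : Prop := 0 < num_groups
instance (int_iterator : List Int) (num_groups : Int) : Decidable (Pre_group_numbers int_iterator num_groups) := by unfold Pre_group_numbers; infer_instance
def pvWitness_group_numbers : List Int × Int := ([1, 2, 3], 2)
def Spec_group_numbers (int_iterator : List Int) (num_groups : Int) (out : List (List Int)) : Prop := out = group_numbers_alt int_iterator num_groups
instance (int_iterator : List Int) (num_groups : Int) (out : List (List Int)) : Decidable (Spec_group_numbers int_iterator num_groups out) := by unfold Spec_group_numbers; infer_instance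

-- ===== CLAIM (what is proved, stated in full; the proofs are below) =====
def Claim_equal_group_numbers : Prop := ∀ (int_iterator : List Int) (num_groups : Int), Dom_group_numbers int_iterator num_groups → Pre_group_numbers int_iterator num_groups → Spec_group_numbers int_iterator num_groups (group_numbers int_iterator num_groups)

-- ===== LEMMAS AND PROOFS =====

theorem pvChunks_nil (k : Nat) : pvChunks [] k = [] := by
  rw [pvChunks.eq_def]; simp

theorem pvChunks_cons (xs : List Int) (k : Nat) (hxs : xs ≠ []) (hk : k ≠ 0) :
    pvChunks xs k = xs.take k :: pvChunks (xs.drop k) k := by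
  rw [pvChunks.eq_def]
  simp [hxs, hk]

-- invariant of A's fold: with buffer cur (|cur| < k) and emitted chunks acc,
-- finishing the fold over xs yields acc ++ the k-chunking of cur ++ xs.
theorem pv_fold_chunks (k : Nat) (hk : 0 < k) (n : Int) (hn : n = (k : Int)) :
    ∀ (xs cur : List Int) (acc : List (List Int)), cur.length < k →
      (let r := xs.foldl (pvAStep n) (acc, cur)
       if r.2 = [] then r.1 else r.1 ++ [r.2]) = acc ++ pvChunks (cur ++ xs) k := by
  intro xs
  induction xs with
  | nil =>
    intro cur acc hcur
    simp only [List.foldl_nil, List.append_nil]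
    by_cases hc : cur = []
    · subst hc
      simp [pvChunks_nil]
    · rw [pvChunks_cons cur k hc (by omega)]
      rw [List.take_of_length_le (le_of_lt hcur), List.drop_eq_nil_of_le (le_of_lt hcur)]
      simp [hc, pvChunks_nil]
  | cons num xs ih =>
    intro cur acc hcur
    simp only [List.foldl_cons]
    by_cases hfull : ((cur ++ [num]).length : Int) = n
    · have hlen : (cur ++ [num]).length = k := by
        rw [hn] at hfull; exact_mod_cast hfull
      have hstep : pvAStep n (acc, cur) num = (acc ++ [cur ++ [num]], []) := by
        simp only [pvAStep]
        rw [if_pos hfull]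
      rw [hstep]
      have hih := ih [] (acc ++ [cur ++ [num]]) hk
      simp only [List.nil_append] at hih
      rw [hih]
      rw [show cur ++ num :: xs = (cur ++ [num]) ++ xs by simp]
      rw [pvChunks_cons ((cur ++ [num]) ++ xs) k (by simp) (by omega)]
      rw [List.take_append_of_le_length hlen.ge, List.drop_append_of_le_length hlen.ge]
      rw [List.take_of_length_le hlen.le, List.drop_eq_nil_of_le hlen.le]
      simp
    · have hlen : (cur ++ [num]).length < k := by
        have hle : (cur ++ [num]).length ≤ k := by simp; omega
        rcases lt_or_eq_of_le hle with h | h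
        · exact h
        · exact absurd (by rw [hn]; exact_mod_cast h) hfull
      have hstep : pvAStep n (acc, cur) num = (acc, cur ++ [num]) := by
        simp only [pvAStep]
        rw [if_neg hfull]
      rw [hstep]
      have hih := ih (cur ++ [num]) acc hlen
      rw [hih]
      simp

-- ===== VERDICT (by name: the statement is the Claim_ definition above) =====
theorem group_numbers_spec : Claim_equal_group_numbers := by
  intro xs n _ hpre
  unfold Spec_group_numbers group_numbers group_numbers_alt
  have hk : 0 < n.toNat := by
    have : (0 : Int) < n := hpre
    omega
  have h := pv_fold_chunks n.toNat hk n (by omega) xs [] [] hk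
  simpa using h
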